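-- pv_equiv track=rewrite | github.com/mzwiesler/advent-of-code2024 | day7/part1.py | find_valid_equations
-- ===== SOURCE A (Python) =====
-- from itertools import product
-- from typing import List, Tuple
--
-- def evaluate_expression(numbers: List[int], operators: Tuple[str, ...]) -> int:
--     """Evaluate the expression formed by numbers and operators."""
--     result = numbers[0]
--     for i in range(len(operators)):
--         if operators[i] == "+":
--             result += numbers[i + 1]
--         elif operators[i] == "*":
--             result *= numbers[i + 1]
--     return result
--
-- def find_valid_equations(equations: List[Tuple[int, List[int]]]):
--     """Find valid equations and calculate the total calibration result."""
--     total_calibration_result = 0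
--
--     for test_value, numbers in equations:
--         num_operators = len(numbers) - 1
--         possible_operators = product("+*", repeat=num_operators)
--
--         for operators in possible_operators:
--             if evaluate_expression(numbers, operators) == test_value:
--                 total_calibration_result += test_value
--                 break
--
--     return total_calibration_result
-- ===== SOURCE B (Python) =====
-- def _solvable(target, rev):
--     """Can `target` be produced left-to-right with + / * from the numbers whose REVERSE is rev?
--     Works backwards from the target, undoing the last operator; * is only followed when it divides."""
--     head, rest = rev[0], rev[1:]
--     if not rest:
--         return head == target
--     if _solvable(target - head, rest):
--         return True
--     if head == 0:
--         return target == 0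
--     return target % head == 0 and _solvable(target // head, rest)
--
-- def find_valid_equations(equations):
--     total = 0
--     for test_value, numbers in equations:
--         if _solvable(test_value, numbers[::-1]):
--             total += test_value
--     return total
-- ===== Notes on version B (the rewrite author's own statement) =====
-- stated objective: faster
-- what changed: Replaces A's exhaustive enumeration of all 2^(n-1) operator tuples (each re-evaluated front-to-back in O(n)) by a backward search from the target over the reversed number list that undoes one operator at a time and follows the multiplication branch only when the last number divides the target, pruning almost all branches on typical inputs.
import Mathlib
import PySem

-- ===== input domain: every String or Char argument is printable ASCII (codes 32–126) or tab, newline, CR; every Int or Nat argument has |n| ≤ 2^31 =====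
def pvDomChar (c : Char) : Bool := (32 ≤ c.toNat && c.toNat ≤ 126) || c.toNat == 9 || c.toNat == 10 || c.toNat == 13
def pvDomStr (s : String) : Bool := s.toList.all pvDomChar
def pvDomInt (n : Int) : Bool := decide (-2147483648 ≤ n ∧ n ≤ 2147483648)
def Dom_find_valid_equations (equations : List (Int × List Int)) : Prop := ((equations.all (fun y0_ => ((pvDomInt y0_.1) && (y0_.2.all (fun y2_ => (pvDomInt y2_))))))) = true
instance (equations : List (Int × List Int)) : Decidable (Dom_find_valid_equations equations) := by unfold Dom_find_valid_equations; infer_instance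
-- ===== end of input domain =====

-- B replaces A's enumeration of all 2^(n-1) operator tuples (each evaluated from scratch) by a
-- backward search from the target that undoes the last operator and follows * only when it divides.

-- ===== PORT A =====
-- itertools.product("+*", repeat=n) in generation order ('+' before '*', last position fastest)
def opTuples : Nat → List (List Char)
  | 0 => [[]]
  | n + 1 => ['+', '*'].flatMap (fun c => (opTuples n).map (fun ops => c :: ops))

-- evaluate_expression; indices i and i+1 are always in range (len(operators) = len(numbers)-1
-- for every tuple A feeds in), and numbers[0] exists under Pre_, so getD is exact here
def evaluate_expression (numbers : List Int) (operators : List Char) : Int :=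
  (List.range operators.length).foldl
    (fun result i =>
      if operators.getD i ' ' = '+' then result + numbers.getD (i + 1) 0
      else if operators.getD i ' ' = '*' then result * numbers.getD (i + 1) 0
      else result)
    (PySem.List.pyGetD numbers 0 0)

def find_valid_equations (equations : List (Int × List Int)) : Int :=
  equations.foldl
    (fun total p =>
      -- inner for-with-break: adds p.1 once iff some operator tuple matches
      if (opTuples (p.2.length - 1)).any (fun operators => evaluate_expression p.2 operators == p.1)
      then total + p.1 else total)
    0

-- ===== PORT B =====
-- _solvable(target, rev): rev is the reversed number list, consumed from the front
def solvable (target : Int) : List Int → Bool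
  | [] => false  -- unreachable under Pre_ (B's Python raises IndexError on rev[0] here, as A raises too)
  | [head] => head == target
  | head :: r :: rest =>
      solvable (target - head) (r :: rest) ||
      (if head == 0 then target == 0
       else (PySem.Int.mod target head == 0) && solvable (PySem.Int.floordiv target head) (r :: rest))

def find_valid_equations_alt (equations : List (Int × List Int)) : Int :=
  equations.foldl
    (fun total p =>
      if solvable p.1 p.2.reverse  -- numbers[::-1]
      then total + p.1 else total)
    0

-- ===== PRECONDITION & SPEC =====
-- Pre_ excludes equations with an empty numbers list: there A raises ValueError
-- (product(repeat=-1)) and B raises IndexError (rev[0]).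
def Pre_find_valid_equations (equations : List (Int × List Int)) : Prop :=
  ∀ p ∈ equations, p.2 ≠ []
instance (equations : List (Int × List Int)) : Decidable (Pre_find_valid_equations equations) := by
  unfold Pre_find_valid_equations; infer_instance

def pvWitness_find_valid_equations : (List (Int × List Int)) := [(6, [2, 3]), (7, [2, 3])]

def Spec_find_valid_equations (equations : List (Int × List Int)) (out : Int) : Prop :=
  out = find_valid_equations_alt equations
instance (equations : List (Int × List Int)) (out : Int) : Decidable (Spec_find_valid_equations equations out) := by
  unfold Spec_find_valid_equations; infer_instance

-- ===== CLAIM (what is proved, stated in full; the proofs are below) =====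
def Claim_equal_find_valid_equations : Prop := ∀ (equations : List (Int × List Int)), Dom_find_valid_equations equations → Pre_find_valid_equations equations → Spec_find_valid_equations equations (find_valid_equations equations)

-- ===== LEMMAS AND PROOFS =====

-- forward left-to-right evaluation of ns under the operator list os, starting from acc
def evalR (acc : Int) : List Char → List Int → Int
  | [], _ => acc
  | _ :: _, [] => acc
  | o :: os, n :: ns => evalR (if o = '+' then acc + n else if o = '*' then acc * n else acc) os ns

-- forward DFS: can `target` be reached from partial result `acc` with the remaining numbers?
def fwd (acc : Int) (rest : List Int) (target : Int) : Bool :=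
  match rest with
  | [] => acc == target
  | h :: t => fwd (acc + h) t target || fwd (acc * h) t target

lemma opTuples_length : ∀ (k : Nat), ∀ ops ∈ opTuples k, ops.length = k := by
  intro k
  induction k with
  | zero => simp [opTuples]
  | succ k ih =>
    intro ops h
    simp only [opTuples, List.mem_flatMap, List.mem_map] at h
    obtain ⟨c, -, ops', hops', rfl⟩ := h
    simp [ih ops' hops']

lemma eval_fold (os : List Char) : ∀ (ns : List Int) (fullo : List Char) (fulln : List Int)
    (s : Nat) (res : Int), fullo.drop s = os → fulln.drop (s + 1) = ns → os.length = ns.length →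
    (List.range' s os.length).foldl
      (fun result i =>
        if fullo.getD i ' ' = '+' then result + fulln.getD (i + 1) 0
        else if fullo.getD i ' ' = '*' then result * fulln.getD (i + 1) 0
        else result) res = evalR res os ns := by
  induction os with
  | nil => intro ns fullo fulln s res _ _ _; simp [evalR]
  | cons o os ih =>
    intro ns fullo fulln s res ho hn hlen
    cases ns with
    | nil => simp at hlen
    | cons n ns =>
      have hgo : fullo.getD s ' ' = o := by
        have : fullo[s]? = some o := by
          have := congrArg (fun l => l[0]?) ho
          simpa [List.getElem?_drop] using this
        simp [List.getD_eq_getElem?_getD, this]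
      have hgn : fulln.getD (s + 1) 0 = n := by
        have : fulln[s + 1]? = some n := by
          have := congrArg (fun l => l[0]?) hn
          simpa [List.getElem?_drop] using this
        simp [List.getD_eq_getElem?_getD, this]
      have ho' : fullo.drop (s + 1) = os := by
        rw [← List.tail_drop, ho]; rfl
      have hn' : fulln.drop (s + 1 + 1) = ns := by
        rw [← List.tail_drop, hn]; rfl
      rw [List.length_cons, List.range'_succ, List.foldl_cons, hgo, hgn]
      rw [ih ns fullo fulln (s + 1) _ ho' hn' (by simpa using hlen)]
      simp [evalR]

lemma eval_eq_evalR (x : Int) (t : List Int) (ops : List Char) (h : ops.length = t.length) :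
    evaluate_expression (x :: t) ops = evalR x ops t := by
  unfold evaluate_expression
  rw [List.range_eq_range', PySem.List.pyGetD_zero_cons]
  exact eval_fold ops t ops (x :: t) 0 x (by simp) (by simp) h

lemma any_eq_fwd : ∀ (t : List Int) (acc tv : Int),
    (opTuples t.length).any (fun ops => evalR acc ops t == tv) = fwd acc t tv := by
  intro t
  induction t with
  | nil => intro acc tv; simp [opTuples, evalR, fwd]
  | cons n ns ih =>
    intro acc tv
    simp only [List.length_cons, opTuples, List.flatMap_cons, List.flatMap_nil,
      List.any_append, List.append_nil, List.any_map, Function.comp_def, fwd]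
    have h1 : ∀ ops : List Char, evalR acc ('+' :: ops) (n :: ns) = evalR (acc + n) ops ns := by
      intro ops; simp [evalR]
    have h2 : ∀ ops : List Char, evalR acc ('*' :: ops) (n :: ns) = evalR (acc * n) ops ns := by
      intro ops; simp [evalR]
    simp only [h1, h2, ih]

-- some value is always forward-reachable
lemma fwd_exists : ∀ (t : List Int) (acc : Int), ∃ w, fwd acc t w = true := by
  intro t
  induction t with
  | nil => intro acc; exact ⟨acc, by simp [fwd]⟩
  | cons n ns ih =>
    intro acc
    obtain ⟨w, hw⟩ := ih (acc + n)
    exact ⟨w, by simp [fwd, hw]⟩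

-- peel the LAST number off a forward search
lemma fwd_append_iff : ∀ (t : List Int) (acc h tv : Int),
    fwd acc (t ++ [h]) tv = true ↔ ∃ w, fwd acc t w = true ∧ (tv = w + h ∨ tv = w * h) := by
  intro t
  induction t with
  | nil =>
    intro acc h tv
    simp only [List.nil_append, fwd, Bool.or_eq_true, beq_iff_eq]
    constructor
    · rintro (rfl | rfl)
      · exact ⟨acc, rfl, Or.inl rfl⟩
      · exact ⟨acc, rfl, Or.inr rfl⟩
    · rintro ⟨w, rfl, (rfl | rfl)⟩ <;> simp
  | cons n ns ih =>
    intro acc h tv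
    simp only [List.cons_append, fwd, Bool.or_eq_true, ih]
    constructor
    · rintro (⟨w, hw, hop⟩ | ⟨w, hw, hop⟩)
      · exact ⟨w, Or.inl hw, hop⟩
      · exact ⟨w, Or.inr hw, hop⟩
    · rintro ⟨w, hw | hw, hop⟩
      · exact Or.inl ⟨w, hw, hop⟩
      · exact Or.inr ⟨w, hw, hop⟩

-- dividing out a nonzero last factor is exact
lemma exists_mul_iff (P : Int → Prop) (h tv : Int) (hne : h ≠ 0) :
    (∃ w, P w ∧ tv = w * h) ↔ (PySem.Int.mod tv h = 0 ∧ P (PySem.Int.floordiv tv h)) := by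
  constructor
  · rintro ⟨w, hP, rfl⟩
    have hdvd : h ∣ w * h := dvd_mul_left h w
    have hmod : PySem.Int.mod (w * h) h = 0 := (PySem.Int.mod_eq_zero_iff_dvd _ _).mpr hdvd
    have hfd : PySem.Int.floordiv (w * h) h = w := by
      have := PySem.Int.floordiv_mul_add_mod (w * h) h
      rw [hmod, add_zero] at this
      exact mul_right_cancel₀ hne this
    exact ⟨hmod, by rw [hfd]; exact hP⟩
  · rintro ⟨hmod, hP⟩
    refine ⟨PySem.Int.floordiv tv h, hP, ?_⟩
    have := PySem.Int.floordiv_mul_add_mod tv h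
    rw [hmod, add_zero] at this
    exact this.symm
-- with a zero last factor, w * 0 = tv is solvable iff tv = 0 (some w always exists)
lemma exists_mul_zero_iff (t : List Int) (acc tv : Int) :
    (∃ w, fwd acc t w = true ∧ tv = w * 0) ↔ tv = 0 := by
  constructor
  · rintro ⟨w, -, rfl⟩; simp
  · rintro rfl
    obtain ⟨w, hw⟩ := fwd_exists t acc
    exact ⟨w, hw, by simp⟩

-- the backward pruned search equals the forward DFS
lemma solvable_eq (x : Int) (t : List Int) : ∀ tv, solvable tv ((x :: t).reverse) = fwd x t tv := by
  induction t using List.reverseRecOn with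
  | nil => intro tv; simp [solvable, fwd]
  | append_singleton t' h ih =>
    intro tv
    have hrev : (x :: (t' ++ [h])).reverse = h :: (x :: t').reverse := by simp
    rw [hrev]
    cases hr : (x :: t').reverse with
    | nil => exact absurd hr (by simp)
    | cons r rs =>
      show (solvable (tv - h) (r :: rs) ||
        (if h == 0 then tv == 0
         else (PySem.Int.mod tv h == 0) && solvable (PySem.Int.floordiv tv h) (r :: rs))) = _
      rw [← hr, ih (tv - h), ih (PySem.Int.floordiv tv h)]
      by_cases hz : h = 0
      · subst hz
        apply Bool.eq_iff_iff.mpr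
        simp only [BEq.rfl, if_true, Bool.or_eq_true, beq_iff_eq, fwd_append_iff]
        constructor
        · rintro (hb | hb)
          · exact ⟨tv - 0, hb, Or.inl (by ring)⟩
          · obtain ⟨w, hw, h2⟩ := (exists_mul_zero_iff t' x tv).mpr hb
            exact ⟨w, hw, Or.inr h2⟩
        · rintro ⟨w, hw, (rfl | rfl)⟩
          · left; simpa using hw
          · right; simp
      · apply Bool.eq_iff_iff.mpr
        rw [if_neg (by simpa using hz)]
        simp only [Bool.or_eq_true, Bool.and_eq_true, beq_iff_eq, fwd_append_iff]
        constructor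
        · rintro (hb | ⟨hmod, hsol⟩)
          · exact ⟨tv - h, hb, Or.inl (by ring)⟩
          · obtain ⟨w, hP, htv⟩ := (exists_mul_iff (fun w => fwd x t' w = true) h tv hz).mpr ⟨hmod, hsol⟩
            exact ⟨w, hP, Or.inr htv⟩
        · rintro ⟨w, hw, (rfl | htv)⟩
          · left; simpa using hw
          · right
            exact (exists_mul_iff (fun w => fwd x t' w = true) h tv hz).mp ⟨w, hw, htv⟩

lemma step_eq (tv x : Int) (t : List Int) (total : Int) :
    (if (opTuples ((x :: t).length - 1)).any
        (fun operators => evaluate_expression (x :: t) operators == tv)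
     then total + tv else total)
    = (if solvable tv ((x :: t).reverse) then total + tv else total) := by
  have hany : (opTuples ((x :: t).length - 1)).any
      (fun operators => evaluate_expression (x :: t) operators == tv)
      = (opTuples t.length).any (fun ops => evalR x ops t == tv) := by
    simp only [List.length_cons, Nat.add_sub_cancel]
    apply Bool.eq_iff_iff.mpr
    simp only [List.any_eq_true]
    constructor <;> rintro ⟨ops, hops, hval⟩ <;> refine ⟨ops, hops, ?_⟩ <;>
      rw [eval_eq_evalR x t ops (opTuples_length t.length ops hops)] at * <;> exact hval
  rw [hany, any_eq_fwd, solvable_eq]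

lemma folds_eq : ∀ (eqs : List (Int × List Int)), Pre_find_valid_equations eqs →
    ∀ (total : Int),
    eqs.foldl
      (fun total p =>
        if (opTuples (p.2.length - 1)).any (fun operators => evaluate_expression p.2 operators == p.1)
        then total + p.1 else total) total
    = eqs.foldl
      (fun total p =>
        if solvable p.1 p.2.reverse then total + p.1 else total) total := by
  intro eqs
  induction eqs with
  | nil => intro _ total; rfl
  | cons p rest ih =>
    intro hpre total
    obtain ⟨tv, nums⟩ := p
    cases nums with
    | nil => exact absurd rfl (hpre _ List.mem_cons_self)
    | cons x t =>
      simp only [List.foldl_cons]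
      rw [step_eq tv x t total]
      exact ih (fun q hq => hpre q (List.mem_cons_of_mem _ hq)) _

-- ===== VERDICT (by name: the statement is the Claim_ definition above) =====
theorem find_valid_equations_spec : Claim_equal_find_valid_equations := by
  intro equations _ hpre
  unfold Spec_find_valid_equations find_valid_equations find_valid_equations_alt
  exact folds_eq equations hpre 0
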